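-- pv_equiv track=rewrite | github.com/jessie-alfred/qa_work | xlsx_to_firebase_event_md.py | grid_to_rows
-- ===== SOURCE A (Python) =====
-- def grid_to_rows(grid):
--     if not grid:
--         return []
--     max_row = max(r for r, c in grid)
--     max_col = max(c for r, c in grid)
--     rows = []
--     for r in range(max_row + 1):
--         row = []
--         for c in range(max_col + 1):
--             row.append(grid.get((r, c), ""))
--         rows.append(row)
--     return rows
-- ===== SOURCE B (Python) =====
-- def grid_to_rows(grid):
--     if not grid:
--         return []
--     max_row = max(r for r, c in grid)
--     max_col = max(c for r, c in grid)
--     rows = [[""] * (max_col + 1) for _ in range(max_row + 1)]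
--     for (r, c), v in grid.items():
--         if r >= 0 and c >= 0:
--             rows[r][c] = v
--     return rows
-- ===== Notes on version B (the rewrite author's own statement) =====
-- stated objective: alternative
-- what changed: B scatters the sparse dict entries once into a pre-allocated dense grid of empty strings instead of scanning every (row,col) cell and looking each one up in the dict.
import Mathlib
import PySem

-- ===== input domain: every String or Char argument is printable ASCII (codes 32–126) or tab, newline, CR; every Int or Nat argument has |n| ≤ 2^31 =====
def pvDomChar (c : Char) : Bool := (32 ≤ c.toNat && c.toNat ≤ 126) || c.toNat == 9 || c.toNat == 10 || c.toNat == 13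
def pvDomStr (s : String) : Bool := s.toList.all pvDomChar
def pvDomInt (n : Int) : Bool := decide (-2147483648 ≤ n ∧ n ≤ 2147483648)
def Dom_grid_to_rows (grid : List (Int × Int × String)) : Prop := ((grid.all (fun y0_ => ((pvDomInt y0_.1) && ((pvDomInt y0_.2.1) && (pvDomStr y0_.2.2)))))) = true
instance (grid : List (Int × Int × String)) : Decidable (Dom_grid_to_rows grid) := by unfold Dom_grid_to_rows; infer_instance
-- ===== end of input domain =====

-- B fills a dense table of empty strings first and scatters the sparse dict entries into it
-- in one pass, instead of A's cell-by-cell scan with a dict lookup per cell (objective: alternative).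

-- ===== PORT A =====
def grid_to_rows (grid : List (Int × Int × String)) : List (List String) :=
  match grid with
  | [] => []  -- `if not grid: return []`
  | e :: rest =>
    let g := e :: rest
    -- max(r for r, c in grid) / max(c for r, c in grid); g is nonempty, the none arm is unreachable
    let maxRow : Int := match PySem.List.max? (g.map (fun p => p.1)) (fun x => x) with
      | some m => m | none => 0
    let maxCol : Int := match PySem.List.max? (g.map (fun p => p.2.1)) (fun x => x) with
      | some m => m | none => 0
    -- the dict parameter, as a PySem.Dict keyed by the (r, c) pair
    let d : PySem.Dict (Int × Int) String := PySem.Dict.mk (g.map (fun p => ((p.1, p.2.1), p.2.2)))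
    (PySem.List.pyRange 0 (maxRow + 1) 1).foldl (fun rows r =>
      rows ++ [(PySem.List.pyRange 0 (maxCol + 1) 1).foldl (fun row c =>
        row ++ [d.getD (r, c) ""]) []]) []

-- ===== PORT B =====
-- loop body of B's scatter pass: `if r >= 0 and c >= 0: rows[r][c] = v`
def pvScatterStep (rows : List (List String)) (p : Int × Int × String) : List (List String) :=
  if 0 ≤ p.1 ∧ 0 ≤ p.2.1 then
    rows.set p.1.toNat ((rows.getD p.1.toNat []).set p.2.1.toNat p.2.2)
  else rows

def grid_to_rows_alt (grid : List (Int × Int × String)) : List (List String) :=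
  match grid with
  | [] => []
  | e :: rest =>
    let g := e :: rest
    let maxRow : Int := match PySem.List.max? (g.map (fun p => p.1)) (fun x => x) with
      | some m => m | none => 0
    let maxCol : Int := match PySem.List.max? (g.map (fun p => p.2.1)) (fun x => x) with
      | some m => m | none => 0
    let rows0 := List.replicate (maxRow + 1).toNat (List.replicate (maxCol + 1).toNat "")
    g.foldl pvScatterStep rows0

-- ===== PRECONDITION & SPEC =====
-- Pre_ excludes association lists with a duplicate (r, c) key: those do not encode any Python
-- dict (A's argument is a dict, whose keys are unique), so A's first-match lookup there is an
-- artefact of the encoding that B's last-write scatter need not reproduce.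
def Pre_grid_to_rows (grid : List (Int × Int × String)) : Prop :=
  (grid.map (fun p => (p.1, p.2.1))).Nodup
instance (grid : List (Int × Int × String)) : Decidable (Pre_grid_to_rows grid) := by
  unfold Pre_grid_to_rows; infer_instance

def pvWitness_grid_to_rows : (List (Int × Int × String)) := [(0, 0, "a"), (1, 2, "b")]

def Spec_grid_to_rows (grid : List (Int × Int × String)) (out : List (List String)) : Prop := out = grid_to_rows_alt grid
instance (grid : List (Int × Int × String)) (out : List (List String)) : Decidable (Spec_grid_to_rows grid out) := by unfold Spec_grid_to_rows; infer_instance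

-- ===== CLAIM (what is proved, stated in full; the proofs are below) =====
def Claim_equal_grid_to_rows : Prop := ∀ (grid : List (Int × Int × String)), Dom_grid_to_rows grid → Pre_grid_to_rows grid → Spec_grid_to_rows grid (grid_to_rows grid)

-- ===== LEMMAS AND PROOFS =====

-- an append-accumulating foldl is a map
theorem pv_foldl_append_map {A B : Type} (l : List A) (f : A → B) (a : List B) :
    l.foldl (fun acc x => acc ++ [f x]) a = a ++ l.map f := by
  induction l generalizing a with
  | nil => simp
  | cons x t ih => simp [List.foldl, ih]

-- find? over the reverse equals find? when all hits are the same element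
theorem pv_find?_reverse_eq {A : Type} (l : List A) (p : A → Bool)
    (h : ∀ a ∈ l, ∀ b ∈ l, p a = true → p b = true → a = b) :
    l.reverse.find? p = l.find? p := by
  induction l with
  | nil => rfl
  | cons x t ih =>
    have ht : ∀ a ∈ t, ∀ b ∈ t, p a = true → p b = true → a = b := by
      intro a ha b hb hpa hpb
      exact h a (List.mem_cons_of_mem _ ha) b (List.mem_cons_of_mem _ hb) hpa hpb
    by_cases hx : p x = true
    · have htr : t.reverse.find? p = none ∨ t.reverse.find? p = some x := by
        rw [ih ht]
        cases hf : t.find? p with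
        | none => exact Or.inl rfl
        | some y =>
          have hy := List.mem_of_find?_eq_some hf
          have hpy := List.find?_some hf
          exact Or.inr (by rw [h y (List.mem_cons_of_mem _ hy) x (List.mem_cons_self) hpy hx])
      simp only [List.reverse_cons, List.find?_append, List.find?_cons, hx]
      rcases htr with h1 | h1 <;> simp [h1]
    · simp only [List.reverse_cons, List.find?_append, List.find?_cons]
      rw [Bool.not_eq_true] at hx
      simp [hx, ih ht]

-- lookup in the Dict built from an association list is find? of the first matching key
theorem pv_getD_mk_eq_find {K V : Type} [BEq K] (l : List (K × V)) (k : K) (dflt : V) :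
    (PySem.Dict.mk l).getD k dflt =
      match l.find? (fun q => q.1 == k) with
      | some q => q.2
      | none => dflt := by
  induction l with
  | nil => rfl
  | cons q t ih =>
    rw [PySem.Dict.getD_eq_get?_getD, PySem.Dict.get?_mk_cons]
    rw [PySem.Dict.getD_eq_get?_getD] at ih
    by_cases hq : (q.1 == k) = true
    · simp [List.find?, hq]
    · rw [Bool.not_eq_true] at hq
      simp [List.find?, hq, ih]

-- the scatter step preserves the shape of the table
theorem pv_step_length (rows : List (List String)) (p : Int × Int × String) :
    (pvScatterStep rows p).length = rows.length := by
  unfold pvScatterStep; split <;> simp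

theorem pv_step_rows {C : Nat} (rows : List (List String)) (p : Int × Int × String)
    (h : ∀ row ∈ rows, row.length = C) :
    ∀ row ∈ pvScatterStep rows p, row.length = C := by
  unfold pvScatterStep
  split
  · by_cases hi : p.1.toNat < rows.length
    · intro row hrow
      rcases List.mem_or_eq_of_mem_set hrow with hmem | heq
      · exact h row hmem
      · subst heq
        rw [List.length_set, List.getD_eq_getElem _ _ hi]
        exact h _ (List.getElem_mem hi)
    · rw [List.set_eq_of_length_le (Nat.le_of_not_lt hi)]; exact h
  · exact h

theorem pv_scatter_rows {C : Nat} (l : List (Int × Int × String)) (acc : List (List String))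
    (h : ∀ row ∈ acc, row.length = C) :
    ∀ row ∈ l.foldl pvScatterStep acc, row.length = C := by
  induction l generalizing acc with
  | nil => exact h
  | cons p t ih => exact ih _ (pv_step_rows acc p h)

theorem pv_scatter_length (l : List (Int × Int × String)) (acc : List (List String)) :
    (l.foldl pvScatterStep acc).length = acc.length := by
  induction l generalizing acc with
  | nil => rfl
  | cons p t ih => simp [List.foldl, ih, pv_step_length]

-- cell (i, j) after one scatter step
theorem pv_step_get {C : Nat} (acc : List (List String)) (p : Int × Int × String)
    (i j : Nat) (hacc : ∀ row ∈ acc, row.length = C) (hi : i < acc.length) (hj : j < C) :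
    ((pvScatterStep acc p).getD i []).getD j "" =
      if p.1 == (i : Int) && p.2.1 == (j : Int) then p.2.2
      else (acc.getD i []).getD j "" := by
  have hrowlen : (acc.getD i []).length = C := by
    rw [List.getD_eq_getElem _ _ hi]; exact hacc _ (List.getElem_mem hi)
  unfold pvScatterStep
  by_cases hpos : 0 ≤ p.1 ∧ 0 ≤ p.2.1
  · rw [if_pos hpos]
    by_cases hri : p.1.toNat = i
    · have houter : ((acc.set p.1.toNat ((acc.getD p.1.toNat []).set p.2.1.toNat p.2.2)).getD i []) =
          (acc.getD i []).set p.2.1.toNat p.2.2 := by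
        subst hri
        rw [List.getD_eq_getElem _ _ (by simpa using hi), List.getElem_set_self]
      rw [houter]
      by_cases hcj : p.2.1.toNat = j
      · have hcond : (p.1 == (i : Int) && p.2.1 == (j : Int)) = true := by
          have h1 : p.1 = (i : Int) := by omega
          have h2 : p.2.1 = (j : Int) := by omega
          simp [h1, h2]
        rw [if_pos hcond]
        subst hcj
        rw [List.getD_eq_getElem _ _ (by rw [List.length_set]; omega), List.getElem_set_self]
      · have hcond : (p.1 == (i : Int) && p.2.1 == (j : Int)) = false := by
          have h2 : p.2.1 ≠ (j : Int) := by omega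
          simp [h2]
        rw [if_neg (by simp [hcond])]
        rw [List.getD_eq_getElem?_getD, List.getElem?_set_ne (by omega), ← List.getD_eq_getElem?_getD]
    · have hcond : (p.1 == (i : Int) && p.2.1 == (j : Int)) = false := by
        have h1 : p.1 ≠ (i : Int) := by omega
        simp [h1]
      rw [if_neg (by simp [hcond])]
      congr 1
      rw [List.getD_eq_getElem?_getD, List.getElem?_set_ne (by omega), ← List.getD_eq_getElem?_getD]
  · rw [if_neg hpos]
    have hcond : ¬ ((p.1 == (i : Int) && p.2.1 == (j : Int)) = true) := by
      intro hc
      simp only [Bool.and_eq_true, beq_iff_eq] at hc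
      exact hpos ⟨by omega, by omega⟩
    rw [if_neg hcond]

-- cell (i, j) of the scatter fold: the last matching entry of l, else the cell of acc
theorem pv_scatter_get {C : Nat} (l : List (Int × Int × String)) (acc : List (List String))
    (i j : Nat) (hacc : ∀ row ∈ acc, row.length = C) (hi : i < acc.length) (hj : j < C) :
    ((l.foldl pvScatterStep acc).getD i []).getD j "" =
      match l.reverse.find? (fun p => p.1 == (i : Int) && p.2.1 == (j : Int)) with
      | some p => p.2.2
      | none => (acc.getD i []).getD j "" := by
  induction l generalizing acc with
  | nil => rfl
  | cons p t ih =>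
    have hi' : i < (pvScatterStep acc p).length := by rw [pv_step_length]; exact hi
    rw [List.foldl_cons, ih (pvScatterStep acc p) (pv_step_rows acc p hacc) hi']
    rw [List.reverse_cons, List.find?_append]
    cases hf : t.reverse.find? (fun p => p.1 == (i : Int) && p.2.1 == (j : Int)) with
    | some y => simp
    | none =>
      simp only [Option.none_or]
      rw [pv_step_get acc p i j hacc hi hj]
      cases hc : (p.1 == (i : Int) && p.2.1 == (j : Int)) <;> simp [List.find?, hc]

-- A on a nonempty grid is the dense double map
theorem pvA_eq (e : Int × Int × String) (rest : List (Int × Int × String)) :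
    grid_to_rows (e :: rest) =
      (PySem.List.pyRange 0 (((rest.map (fun p => p.1)).foldl max e.1) + 1) 1).map (fun r =>
        (PySem.List.pyRange 0 (((rest.map (fun p => p.2.1)).foldl max e.2.1) + 1) 1).map (fun c =>
          (PySem.Dict.mk ((e :: rest).map (fun p => ((p.1, p.2.1), p.2.2)))).getD (r, c) "")) := by
  simp only [grid_to_rows, List.map_cons, PySem.List.max?_id_cons, pv_foldl_append_map,
    List.nil_append]

-- B on a nonempty grid is the scatter fold over the blank table
theorem pvB_eq (e : Int × Int × String) (rest : List (Int × Int × String)) :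
    grid_to_rows_alt (e :: rest) =
      (e :: rest).foldl pvScatterStep
        (List.replicate (((rest.map (fun p => p.1)).foldl max e.1) + 1).toNat
          (List.replicate (((rest.map (fun p => p.2.1)).foldl max e.2.1) + 1).toNat "")) := by
  simp only [grid_to_rows_alt, List.map_cons, PySem.List.max?_id_cons]

-- ===== VERDICT (by name: the statement is the Claim_ definition above) =====
theorem grid_to_rows_spec : Claim_equal_grid_to_rows := by
  intro grid _hdom hpre
  unfold Spec_grid_to_rows
  cases grid with
  | nil => rfl
  | cons e rest =>
    rw [pvA_eq, pvB_eq]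
    set M : Int := (rest.map (fun p => p.1)).foldl max e.1 with hM
    set N : Int := (rest.map (fun p => p.2.1)).foldl max e.2.1 with hN
    set rows0 : List (List String) :=
      List.replicate (M + 1).toNat (List.replicate (N + 1).toNat "") with hrows0
    have hrows0len : ∀ row ∈ rows0, row.length = (N + 1).toNat := by
      intro row hrow
      rw [hrows0] at hrow
      rw [List.eq_of_mem_replicate hrow, List.length_replicate]
    apply List.ext_getElem
    · rw [List.length_map, PySem.List.length_pyRange_one, pv_scatter_length, hrows0,
        List.length_replicate]
      simp
    · intro i hiA hiB
      have hiR : i < (M + 1).toNat := by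
        simpa [PySem.List.length_pyRange_one] using hiA
      have hi0 : i < rows0.length := by rw [hrows0, List.length_replicate]; exact hiR
      apply List.ext_getElem
      · rw [List.getElem_map, List.length_map, PySem.List.length_pyRange_one]
        have := pv_scatter_rows (e :: rest) rows0 hrows0len _
          (List.getElem_mem hiB)
        rw [this]
        simp
      · intro j hjA hjB
        have hjC : j < (N + 1).toNat := by
          simpa [PySem.List.length_pyRange_one] using hjA
        -- A side cell
        simp only [List.getElem_map, PySem.List.getElem_pyRange_one]
        -- B side cell, through getD
        have hBlen : i < ((e :: rest).foldl pvScatterStep rows0).length := by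
          rw [pv_scatter_length]; exact hi0
        have hBcell : ((e :: rest).foldl pvScatterStep rows0)[i][j] =
            ((((e :: rest).foldl pvScatterStep rows0).getD i []).getD j "") := by
          rw [List.getD_eq_getElem _ _ hBlen, List.getD_eq_getElem]
        rw [hBcell, pv_scatter_get (C := (N + 1).toNat) _ _ _ _ hrows0len hi0 hjC]
        -- the reversed find? equals the forward find? thanks to Nodup keys
        have hinj := List.inj_on_of_nodup_map hpre
        rw [pv_find?_reverse_eq _ _ (by
          intro a ha b hb hpa hpb
          simp only [Bool.and_eq_true, beq_iff_eq] at hpa hpb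
          exact hinj ha hb (by rw [Prod.mk.injEq]; exact ⟨hpa.1.trans hpb.1.symm, hpa.2.trans hpb.2.symm⟩))]
        -- the dict lookup is the forward find?
        rw [pv_getD_mk_eq_find, List.find?_map]
        have h1 : rows0.getD i [] = List.replicate (N + 1).toNat "" := by
          rw [hrows0]
          rw [List.getD_eq_getElem _ _ (by rw [List.length_replicate]; exact hiR)]
          rw [List.getElem_replicate]
        have hrows0cell : (rows0.getD i []).getD j "" = "" := by
          rw [h1]
          rw [List.getD_eq_getElem _ _ (by rw [List.length_replicate]; exact hjC)]
          rw [List.getElem_replicate]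
        rw [hrows0cell]
        have hpred : (fun q : (Int × Int) × String => q.1 == ((0 : Int) + i, (0 : Int) + j)) ∘
            (fun p : Int × Int × String => ((p.1, p.2.1), p.2.2)) =
            fun p : Int × Int × String => p.1 == ((i : Int)) && p.2.1 == ((j : Int)) := by
          funext p
          rw [Bool.eq_iff_iff]
          simp [Prod.ext_iff, zero_add]
        rw [hpred]
        cases hf : (e :: rest).find? (fun p => p.1 == ((i : Int)) && p.2.1 == ((j : Int))) <;>
          simp
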